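-- pv_equiv track=rewrite | github.com/washyu/mcp_python_server | src/utils/proxmox_api.py | _classify_gpu_capabilities
-- ===== SOURCE A (Python) =====
-- from typing import Dict, Any, List, Optional, Tuple
--
-- def _classify_gpu_capabilities(vendor: str, device: str) -> List[str]:
--     """Classify GPU capabilities based on vendor and model."""
--     vendor_lower = vendor.lower()
--     device_lower = device.lower()
--     capabilities = []
--
--     # AMD GPUs
--     if 'amd' in vendor_lower or 'ati' in vendor_lower:
--         if any(model in device_lower for model in ['mi50', 'mi100', 'mi200', 'instinct']):
--             capabilities.extend(['ai_training', 'compute', 'opencl', 'rocm'])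
--         elif any(model in device_lower for model in ['rx', 'radeon']):
--             capabilities.extend(['gaming', 'compute', 'opencl'])
--         else:
--             capabilities.extend(['display', 'compute'])
--
--     # NVIDIA GPUs
--     elif 'nvidia' in vendor_lower:
--         if any(model in device_lower for model in ['tesla', 'quadro', 'a100', 'v100']):
--             capabilities.extend(['ai_training', 'compute', 'cuda'])
--         elif any(model in device_lower for model in ['rtx', 'gtx', 'geforce']):
--             capabilities.extend(['gaming', 'ai_training', 'cuda'])
--         else:
--             capabilities.extend(['display', 'compute'])
--
--     # Intel GPUs
--     elif 'intel' in vendor_lower: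
--         if 'arc' in device_lower:
--             capabilities.extend(['gaming', 'compute'])
--         else:
--             capabilities.extend(['display'])
--
--     # Default for unknown
--     if not capabilities:
--         capabilities.append('display')
--
--     return capabilities
-- ===== SOURCE B (Python) =====
-- _VENDOR_KW = {'amd': 0, 'ati': 0, 'nvidia': 1, 'intel': 2}
--
-- _MODEL_KW = [
--     {'mi50': 0, 'mi100': 0, 'mi200': 0, 'instinct': 0, 'rx': 1, 'radeon': 1},
--     {'tesla': 0, 'quadro': 0, 'a100': 0, 'v100': 0, 'rtx': 1, 'gtx': 1, 'geforce': 1},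
--     {'arc': 0},
-- ]
--
-- _CAPS = [
--     [['ai_training', 'compute', 'opencl', 'rocm'], ['gaming', 'compute', 'opencl'], ['display', 'compute']],
--     [['ai_training', 'compute', 'cuda'], ['gaming', 'ai_training', 'cuda'], ['display', 'compute']],
--     [['gaming', 'compute'], ['display'], ['display']],
-- ]
--
--
-- def _scan_min(text, kwmap, best):
--     """One positional sweep over text: at each position, lower the running rank
--     to the rank of any keyword starting there."""
--     for i in range(len(text)):
--         for k, v in kwmap.items():
--             if v < best and text.startswith(k, i):
--                 best = v
--     return best
--
--
-- def _classify_gpu_capabilities(vendor, device):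
--     """Classify GPU capabilities: rank the vendor and the model tier by a single
--     positional keyword sweep, then look the pair up in a capability table."""
--     v = _scan_min(vendor.lower(), _VENDOR_KW, 3)
--     if v == 3:
--         return ['display']
--     t = _scan_min(device.lower(), _MODEL_KW[v], 2)
--     return list(_CAPS[v][t])
-- ===== Notes on version B (the rewrite author's own statement) =====
-- stated objective: alternative
-- what changed: Instead of A's ordered chain of substring tests ('kw in s' per keyword with if/elif priority), B makes one positional sweep over each lowercased string, keeping the minimum rank of any keyword that starts at any position (vendor rank, then model-tier rank), and returns the row of a flat capability table indexed by the (vendor, tier) pair; correctness rests on the priority minimum over found keywords equalling the first-match chain.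
import Mathlib
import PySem

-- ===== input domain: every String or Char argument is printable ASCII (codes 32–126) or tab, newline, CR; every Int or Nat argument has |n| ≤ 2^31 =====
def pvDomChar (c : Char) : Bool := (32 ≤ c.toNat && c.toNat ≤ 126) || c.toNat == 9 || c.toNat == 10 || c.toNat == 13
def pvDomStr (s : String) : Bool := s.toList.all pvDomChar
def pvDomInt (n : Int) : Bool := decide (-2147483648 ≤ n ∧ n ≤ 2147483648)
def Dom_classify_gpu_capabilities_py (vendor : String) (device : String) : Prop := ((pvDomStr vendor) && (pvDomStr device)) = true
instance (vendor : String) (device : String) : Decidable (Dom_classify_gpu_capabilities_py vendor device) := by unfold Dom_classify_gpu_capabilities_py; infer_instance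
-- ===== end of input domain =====

-- B replaces A's ordered if/elif chain of substring tests by a single positional sweep that keeps
-- the minimum rank of any keyword starting at any position, then indexes a flat capability table.

-- ===== PORT A =====
def classify_gpu_capabilities_py (vendor : String) (device : String) : List String :=
  let vendor_lower := PySem.Str.lower vendor
  let device_lower := PySem.Str.lower device
  let capabilities : List String := []
  let capabilities :=
    if PySem.Str.isIn "amd" vendor_lower || PySem.Str.isIn "ati" vendor_lower then
      if (["mi50", "mi100", "mi200", "instinct"] : List String).any
          (fun model => PySem.Str.isIn model device_lower) then
        capabilities ++ ["ai_training", "compute", "opencl", "rocm"]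
      else if (["rx", "radeon"] : List String).any
          (fun model => PySem.Str.isIn model device_lower) then
        capabilities ++ ["gaming", "compute", "opencl"]
      else
        capabilities ++ ["display", "compute"]
    else if PySem.Str.isIn "nvidia" vendor_lower then
      if (["tesla", "quadro", "a100", "v100"] : List String).any
          (fun model => PySem.Str.isIn model device_lower) then
        capabilities ++ ["ai_training", "compute", "cuda"]
      else if (["rtx", "gtx", "geforce"] : List String).any
          (fun model => PySem.Str.isIn model device_lower) then
        capabilities ++ ["gaming", "ai_training", "cuda"]
      else
        capabilities ++ ["display", "compute"]
    else if PySem.Str.isIn "intel" vendor_lower then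
      if PySem.Str.isIn "arc" device_lower then
        capabilities ++ ["gaming", "compute"]
      else
        capabilities ++ ["display"]
    else capabilities
  if capabilities = [] then capabilities ++ ["display"] else capabilities

-- ===== PORT B =====
-- dicts keyword → rank, in insertion order (PySem.Dict iteration = assoc-list order)
def pvVendorKW : List (String × Nat) := [("amd", 0), ("ati", 0), ("nvidia", 1), ("intel", 2)]

def pvModelKW : List (List (String × Nat)) :=
  [ [("mi50", 0), ("mi100", 0), ("mi200", 0), ("instinct", 0), ("rx", 1), ("radeon", 1)],
    [("tesla", 0), ("quadro", 0), ("a100", 0), ("v100", 0), ("rtx", 1), ("gtx", 1), ("geforce", 1)],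
    [("arc", 0)] ]

def pvCaps : List (List (List String)) :=
  [ [["ai_training", "compute", "opencl", "rocm"], ["gaming", "compute", "opencl"], ["display", "compute"]],
    [["ai_training", "compute", "cuda"], ["gaming", "ai_training", "cuda"], ["display", "compute"]],
    [["gaming", "compute"], ["display"], ["display"]] ]

-- _scan_min: one sweep over the positions of text; text.startswith(k, i) with 0 ≤ i is exactly
-- 'k.toList is a prefix of text.toList.drop i' (hand port: PySem.Str.startswith has no start arg)
def pvScanMin (text : List Char) (kwmap : List (String × Nat)) (best : Nat) : Nat :=
  (List.range text.length).foldl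
    (fun best i =>
      kwmap.foldl
        (fun best kv => if kv.2 < best ∧ kv.1.toList.isPrefixOf (text.drop i) then kv.2 else best)
        best)
    best

def classify_gpu_capabilities_py_alt (vendor : String) (device : String) : List String :=
  let v := pvScanMin (PySem.Str.lower vendor).toList pvVendorKW 3
  if v = 3 then ["display"]
  else
    -- _MODEL_KW[v] and _CAPS[v][t]: v < 3 and t ≤ 2 always, so plain list indexing is exact
    let t := pvScanMin (PySem.Str.lower device).toList (pvModelKW.getD v []) 2
    (pvCaps.getD v []).getD t []

-- ===== PRECONDITION & SPEC =====
def Spec_classify_gpu_capabilities_py (vendor : String) (device : String) (out : List String) : Prop := out = classify_gpu_capabilities_py_alt vendor device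
instance (vendor : String) (device : String) (out : List String) : Decidable (Spec_classify_gpu_capabilities_py vendor device out) := by unfold Spec_classify_gpu_capabilities_py; infer_instance

-- ===== CLAIM (what is proved, stated in full; the proofs are below) =====
def Claim_equal_classify_gpu_capabilities_py : Prop := ∀ (vendor : String) (device : String), Dom_classify_gpu_capabilities_py vendor device → Spec_classify_gpu_capabilities_py vendor device (classify_gpu_capabilities_py vendor device)

-- ===== LEMMAS AND PROOFS =====

-- the inner keyword loop of pvScanMin, abstracted over the per-keyword test H
def pvG (H : String → Bool) (kw : List (String × Nat)) (d : Nat) : Nat :=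
  kw.foldl (fun b kv => if kv.2 < b ∧ H kv.1 then kv.2 else b) d

lemma pvG_le (H : String → Bool) (kw : List (String × Nat)) (d : Nat) : pvG H kw d ≤ d := by
  induction kw generalizing d with
  | nil => simp [pvG]
  | cons kv rest ih =>
      simp only [pvG, List.foldl_cons]
      refine le_trans (ih _) ?_
      split_ifs with h
      · exact le_of_lt h.1
      · exact le_rfl

-- normal form: starting from any d ≤ B, the loop computes min d (loop from B)
lemma pvG_min (H : String → Bool) (kw : List (String × Nat)) (B : Nat)
    (hb : ∀ kv ∈ kw, kv.2 < B) :
    ∀ d ≤ B, pvG H kw d = min d (pvG H kw B) := by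
  induction kw with
  | nil => intro d hd; simp [pvG]; omega
  | cons kv rest ih =>
      intro d hd
      have hv : kv.2 < B := hb kv List.mem_cons_self
      have hb' : ∀ p ∈ rest, p.2 < B := fun p hp => hb p (List.mem_cons_of_mem _ hp)
      simp only [pvG, List.foldl_cons] at *
      by_cases h : H kv.1
      · have e1 : (if kv.2 < d ∧ H kv.1 then kv.2 else d) = min d kv.2 := by
          split_ifs <;> simp_all <;> omega
        have e2 : (if kv.2 < B ∧ H kv.1 then kv.2 else B) = kv.2 := by
          split_ifs <;> simp_all
        rw [e1, e2]
        rw [ih hb' (min d kv.2) (by omega), ih hb' kv.2 (by omega)]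
        omega
      · have e1 : (if kv.2 < d ∧ H kv.1 then kv.2 else d) = d := by simp [h]
        have e2 : (if kv.2 < B ∧ H kv.1 then kv.2 else B) = B := by simp [h]
        rw [e1, e2, ih hb' d hd]

-- keyword ranks combine by min when the tests combine by 'or'
lemma pvG_or (H H₁ H₂ : String → Bool) (kw : List (String × Nat)) (B : Nat)
    (hb : ∀ kv ∈ kw, kv.2 < B)
    (hH : ∀ kv ∈ kw, H kv.1 = (H₁ kv.1 || H₂ kv.1)) :
    pvG H kw B = min (pvG H₁ kw B) (pvG H₂ kw B) := by
  induction kw with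
  | nil => simp [pvG]
  | cons kv rest ih =>
      have hv : kv.2 < B := hb kv List.mem_cons_self
      have hb' : ∀ p ∈ rest, p.2 < B := fun p hp => hb p (List.mem_cons_of_mem _ hp)
      have hH0 : H kv.1 = (H₁ kv.1 || H₂ kv.1) := hH kv List.mem_cons_self
      have hH' : ∀ p ∈ rest, H p.1 = (H₁ p.1 || H₂ p.1) := fun p hp => hH p (List.mem_cons_of_mem _ hp)
      have ih' := ih hb' hH'
      show pvG H rest (if kv.2 < B ∧ H kv.1 then kv.2 else B)
        = min (pvG H₁ rest (if kv.2 < B ∧ H₁ kv.1 then kv.2 else B))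
              (pvG H₂ rest (if kv.2 < B ∧ H₂ kv.1 then kv.2 else B))
      rw [pvG_min H rest B hb' _ (by split_ifs <;> omega),
          pvG_min H₁ rest B hb' _ (by split_ifs <;> omega),
          pvG_min H₂ rest B hb' _ (by split_ifs <;> omega), ih']
      by_cases h1 : H₁ kv.1 <;> by_cases h2 : H₂ kv.1 <;>
        simp [hH0, h1, h2, hv] <;> omega

lemma isIn_cons (sub : List Char) (c : Char) (l : List Char) :
    PySem.Chars.isIn sub (c :: l) = (sub.isPrefixOf (c :: l) || PySem.Chars.isIn sub l) := by
  by_cases h : PySem.Chars.isIn sub (c :: l) = true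
  · have ⟨j, hj⟩ := (PySem.Chars.exists_prefix_drop_iff_isIn sub (c :: l)).mpr h
    rw [h]
    match j with
    | 0 => simp at hj; simp [List.isPrefixOf_iff_prefix, hj]
    | j + 1 =>
        simp only [List.drop_succ_cons] at hj
        have : PySem.Chars.isIn sub l = true :=
          (PySem.Chars.exists_prefix_drop_iff_isIn sub l).mp ⟨j, hj⟩
        simp [this]
  · rw [Bool.not_eq_true] at h
    rw [h]
    have hno := (PySem.Chars.isIn_eq_false_iff sub (c :: l)).mp h
    have h1 : sub.isPrefixOf (c :: l) = false := by
      rw [Bool.eq_false_iff]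
      intro hp
      exact hno ((List.isPrefixOf_iff_prefix.mp hp).isInfix)
    have h2 : PySem.Chars.isIn sub l = false := by
      rw [PySem.Chars.isIn_eq_false_iff]
      intro hi
      exact hno (hi.trans (List.suffix_cons c l).isInfix)
    rw [h1, h2]; rfl

lemma scan_cons (c : Char) (l : List Char) (kw : List (String × Nat)) (d : Nat) :
    pvScanMin (c :: l) kw d =
      pvScanMin l kw (pvG (fun k => k.toList.isPrefixOf (c :: l)) kw d) := by
  simp only [pvScanMin, pvG, List.length_cons, List.range_succ_eq_map, List.foldl_cons,
    List.foldl_map, List.drop_succ_cons, List.drop_zero]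
  rfl

-- main: the positional sweep equals the 'substring anywhere' rank loop
lemma scan_eq (kw : List (String × Nat)) (B : Nat)
    (hb : ∀ kv ∈ kw, kv.2 < B ∧ kv.1.toList ≠ []) (t : List Char) :
    pvScanMin t kw B = pvG (fun k => PySem.Chars.isIn k.toList t) kw B := by
  have key : ∀ (t : List Char) (d : Nat), d ≤ B →
      pvScanMin t kw d = min d (pvG (fun k => PySem.Chars.isIn k.toList t) kw B) := by
    intro t
    induction t with
    | nil =>
        intro d hd
        have : pvG (fun k => PySem.Chars.isIn k.toList []) kw B = B := by
          have : ∀ kv ∈ kw, PySem.Chars.isIn kv.1.toList [] = false := by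
            intro kv hkv
            rw [PySem.Chars.isIn_eq_false_iff]
            intro hinf
            exact (hb kv hkv).2 (List.eq_nil_of_infix_nil hinf)
          clear hb hd
          induction kw with
          | nil => rfl
          | cons kv rest ih =>
              simp only [pvG, List.foldl_cons, this kv List.mem_cons_self, Bool.false_eq_true,
                and_false, if_false]
              exact ih (fun p hp => this p (List.mem_cons_of_mem _ hp))
        rw [this]
        simp [pvScanMin]
        omega
    | cons c l ih =>
        intro d hd
        rw [scan_cons]
        have hstep : pvG (fun k => k.toList.isPrefixOf (c :: l)) kw d ≤ B :=
          le_trans (pvG_le _ _ _) hd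
        rw [ih _ hstep]
        have hb1 : ∀ kv ∈ kw, kv.2 < B := fun kv hkv => (hb kv hkv).1
        rw [pvG_min _ kw B hb1 d hd,
            pvG_or (fun k => PySem.Chars.isIn k.toList (c :: l))
              (fun k => k.toList.isPrefixOf (c :: l))
              (fun k => PySem.Chars.isIn k.toList l) kw B hb1
              (fun kv _ => isIn_cons kv.1.toList c l)]
        omega
  rw [key t B le_rfl]
  have : pvG (fun k => PySem.Chars.isIn k.toList t) kw B ≤ B := pvG_le _ _ _
  omega

-- vendor rank loop evaluated against A's vendor chain
lemma vendor_rank (s : List Char) :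
    pvG (fun k => PySem.Chars.isIn k.toList s) pvVendorKW 3 =
    if PySem.Chars.isIn "amd".toList s || PySem.Chars.isIn "ati".toList s then 0
    else if PySem.Chars.isIn "nvidia".toList s then 1
    else if PySem.Chars.isIn "intel".toList s then 2
    else 3 := by
  simp only [pvG, pvVendorKW, List.foldl_cons, List.foldl_nil]
  by_cases h1 : PySem.Chars.isIn "amd".toList s <;>
  by_cases h2 : PySem.Chars.isIn "ati".toList s <;>
  by_cases h3 : PySem.Chars.isIn "nvidia".toList s <;>
  by_cases h4 : PySem.Chars.isIn "intel".toList s <;>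
  simp_all

-- per-vendor capability lemmas: evaluate the model-rank loop against A's if/elif chain
lemma amd_caps (t : List Char) :
    (pvCaps.getD 0 []).getD
      (pvG (fun k => PySem.Chars.isIn k.toList t) (pvModelKW.getD 0 []) 2) [] =
    if (["mi50", "mi100", "mi200", "instinct"] : List String).any
        (fun model => PySem.Chars.isIn model.toList t) then
      ["ai_training", "compute", "opencl", "rocm"]
    else if (["rx", "radeon"] : List String).any
        (fun model => PySem.Chars.isIn model.toList t) then
      ["gaming", "compute", "opencl"]
    else ["display", "compute"] := by
  simp only [pvCaps, pvModelKW, pvG, List.foldl_cons, List.foldl_nil, List.any_cons, List.any_nil]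
  by_cases h1 : PySem.Chars.isIn "mi50".toList t <;>
  by_cases h2 : PySem.Chars.isIn "mi100".toList t <;>
  by_cases h3 : PySem.Chars.isIn "mi200".toList t <;>
  by_cases h4 : PySem.Chars.isIn "instinct".toList t <;>
  by_cases h5 : PySem.Chars.isIn "rx".toList t <;>
  by_cases h6 : PySem.Chars.isIn "radeon".toList t <;>
  simp_all

lemma nvidia_caps (t : List Char) :
    (pvCaps.getD 1 []).getD
      (pvG (fun k => PySem.Chars.isIn k.toList t) (pvModelKW.getD 1 []) 2) [] =
    if (["tesla", "quadro", "a100", "v100"] : List String).any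
        (fun model => PySem.Chars.isIn model.toList t) then
      ["ai_training", "compute", "cuda"]
    else if (["rtx", "gtx", "geforce"] : List String).any
        (fun model => PySem.Chars.isIn model.toList t) then
      ["gaming", "ai_training", "cuda"]
    else ["display", "compute"] := by
  simp only [pvCaps, pvModelKW, pvG, List.foldl_cons, List.foldl_nil, List.any_cons, List.any_nil]
  by_cases h1 : PySem.Chars.isIn "tesla".toList t <;>
  by_cases h2 : PySem.Chars.isIn "quadro".toList t <;>
  by_cases h3 : PySem.Chars.isIn "a100".toList t <;>
  by_cases h4 : PySem.Chars.isIn "v100".toList t <;>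
  by_cases h5 : PySem.Chars.isIn "rtx".toList t <;>
  by_cases h6 : PySem.Chars.isIn "gtx".toList t <;>
  by_cases h7 : PySem.Chars.isIn "geforce".toList t <;>
  simp_all

lemma intel_caps (t : List Char) :
    (pvCaps.getD 2 []).getD
      (pvG (fun k => PySem.Chars.isIn k.toList t) (pvModelKW.getD 2 []) 2) [] =
    if PySem.Chars.isIn "arc".toList t then ["gaming", "compute"] else ["display"] := by
  simp only [pvCaps, pvModelKW, pvG, List.foldl_cons, List.foldl_nil]
  by_cases h : PySem.Chars.isIn "arc".toList t <;> simp_all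

-- ===== VERDICT (by name: the statement is the Claim_ definition above) =====
set_option maxHeartbeats 2000000 in
theorem classify_gpu_capabilities_py_spec : Claim_equal_classify_gpu_capabilities_py := by
  intro vendor device _
  unfold Spec_classify_gpu_capabilities_py classify_gpu_capabilities_py
    classify_gpu_capabilities_py_alt
  simp only [PySem.Str.isIn_eq]
  rw [scan_eq pvVendorKW 3 (by decide), vendor_rank]
  cases h1 : PySem.Chars.isIn "amd".toList (PySem.Str.lower vendor).toList <;>
  cases h2 : PySem.Chars.isIn "ati".toList (PySem.Str.lower vendor).toList <;>
  cases h3 : PySem.Chars.isIn "nvidia".toList (PySem.Str.lower vendor).toList <;>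
  cases h4 : PySem.Chars.isIn "intel".toList (PySem.Str.lower vendor).toList <;>
  simp only [Bool.or_false, Bool.false_or, Bool.or_true, Bool.true_or, Bool.false_eq_true,
    eq_self_iff_true, if_true, if_false, Nat.reduceEqDiff, List.nil_append] <;>
  first
    | rfl
    | (rw [scan_eq (pvModelKW.getD 0 []) 2 (by decide), amd_caps]; split_ifs <;> simp_all)
    | (rw [scan_eq (pvModelKW.getD 1 []) 2 (by decide), nvidia_caps]; split_ifs <;> simp_all)
    | (rw [scan_eq (pvModelKW.getD 2 []) 2 (by decide), intel_caps]; split_ifs <;> simp_all)
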